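-- pv_equiv track=rewrite | github.com/nveretennicov/advent-of-code | 2022/day-03/day_03b.py | get_shared_item_type
-- ===== SOURCE A (Python) =====
-- def get_shared_item_type(rucksacks):
--     for item in rucksacks[0]:
--         item_in_every_rucksack = True
--         for rucksack in rucksacks[1:]:
--             if not item in rucksack:
--                 item_in_every_rucksack = False
--                 break
--         if item_in_every_rucksack:
--             return item
-- ===== SOURCE B (Python) =====
-- def get_shared_item_type(rucksacks):
--     common = set(rucksacks[0]).intersection(*rucksacks[1:])
--     for item in rucksacks[0]:
--         if item in common:
--             return item
-- ===== Notes on version B (the rewrite author's own statement) =====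
-- stated objective: simpler
-- what changed: A's per-candidate inner scan over rucksacks[1:] is replaced by one precomputed set intersection across all rucksacks followed by a single ordered scan of rucksacks[0].
import Mathlib
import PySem

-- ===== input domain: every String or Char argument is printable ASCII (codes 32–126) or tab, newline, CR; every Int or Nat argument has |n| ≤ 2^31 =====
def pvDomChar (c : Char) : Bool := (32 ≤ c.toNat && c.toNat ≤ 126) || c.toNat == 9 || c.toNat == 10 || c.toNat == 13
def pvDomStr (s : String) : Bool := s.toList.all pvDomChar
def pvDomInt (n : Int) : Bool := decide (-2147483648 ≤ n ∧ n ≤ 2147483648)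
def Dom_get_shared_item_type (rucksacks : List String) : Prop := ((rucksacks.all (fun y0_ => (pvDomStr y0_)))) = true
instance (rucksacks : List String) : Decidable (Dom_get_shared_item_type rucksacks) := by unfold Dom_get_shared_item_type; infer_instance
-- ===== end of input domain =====

-- B replaces A's per-candidate inner scan of rucksacks[1:] by one precomputed set
-- intersection across all rucksacks plus a single ordered scan of rucksacks[0] (objective: simpler).

-- ===== PORT A =====
-- inner loop: 'for rucksack in rucksacks[1:]: if not item in rucksack: flag = False; break'
def pvAInner (item : String) : List String → Bool
  | [] => true
  | r :: rs => if PySem.Str.isIn item r then pvAInner item rs else false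

-- outer loop: 'for item in rucksacks[0]: … if item_in_every_rucksack: return item'
def pvALoop (rest : List String) : List Char → Option String
  | [] => none
  | c :: cs =>
    if pvAInner (String.ofList [c]) rest then some (String.ofList [c]) else pvALoop rest cs

def get_shared_item_type (rucksacks : List String) : Option String :=
  match PySem.List.pyGet? rucksacks 0 with
  | none => none   -- IndexError on the empty list, excluded by Pre_
  | some first => pvALoop (PySem.List.slice rucksacks (some 1) none) first.toList

-- ===== PORT B =====
-- 'common = set(rucksacks[0]).intersection(*rucksacks[1:])'
def pvBCommon (first : PySem.Set Char) (rest : List String) : PySem.Set Char :=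
  rest.foldl (fun s r => PySem.Set.inter s r.toList) first

def get_shared_item_type_alt (rucksacks : List String) : Option String :=
  match PySem.List.pyGet? rucksacks 0 with
  | none => none   -- IndexError on the empty list, excluded by Pre_
  | some first =>
    let common := pvBCommon (PySem.Set.ofList first.toList) (PySem.List.slice rucksacks (some 1) none)
    match first.toList.find? (fun c => PySem.Set.contains common c) with
    | some c => some (String.ofList [c])
    | none => none

-- ===== PRECONDITION & SPEC =====
-- Both A and B index rucksacks[0]: the empty list raises IndexError in both, so it is excluded.
def Pre_get_shared_item_type (rucksacks : List String) : Prop := rucksacks ≠ []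
instance (rucksacks : List String) : Decidable (Pre_get_shared_item_type rucksacks) := by unfold Pre_get_shared_item_type; infer_instance
def pvWitness_get_shared_item_type : List String := ["vJrwpWtwJgWr", "jqHRNqRjqzjGDLGL", "PmmdzqPrV"]

def Spec_get_shared_item_type (rucksacks : List String) (out : Option String) : Prop := out = get_shared_item_type_alt rucksacks
instance (rucksacks : List String) (out : Option String) : Decidable (Spec_get_shared_item_type rucksacks out) := by unfold Spec_get_shared_item_type; infer_instance

-- ===== CLAIM (what is proved, stated in full; the proofs are below) =====
def Claim_equal_get_shared_item_type : Prop := ∀ (rucksacks : List String), Dom_get_shared_item_type rucksacks → Pre_get_shared_item_type rucksacks → Spec_get_shared_item_type rucksacks (get_shared_item_type rucksacks)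

-- ===== LEMMAS AND PROOFS =====

-- 'item in rucksack' for a one-character item is character membership
theorem pv_isIn_singleton (c : Char) (r : String) :
    PySem.Str.isIn (String.ofList [c]) r = decide (c ∈ r.toList) := by
  have h := PySem.Str.isIn_iff_infix (String.ofList [c]) r
  rw [show (String.ofList [c]).toList = [c] by simp, List.singleton_infix_iff] at h
  rcases b : PySem.Str.isIn (String.ofList [c]) r
  · rw [b] at h
    have hn : c ∉ r.toList := fun hc => by cases h.mpr hc
    simp [hn]
  · rw [b] at h; simp [h.mp rfl]

theorem pvAInner_eq_all (item : String) (rs : List String) :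
    pvAInner item rs = rs.all (fun r => PySem.Str.isIn item r) := by
  induction rs with
  | nil => rfl
  | cons r rs ih => simp [pvAInner, List.all_cons, ih]

theorem pv_mem_common (first : PySem.Set Char) (rest : List String) (c : Char) :
    c ∈ pvBCommon first rest ↔ c ∈ first ∧ ∀ r ∈ rest, c ∈ r.toList := by
  induction rest generalizing first with
  | nil => simp [pvBCommon]
  | cons r rs ih =>
    simp only [pvBCommon, List.foldl_cons] at *
    rw [ih]
    simp [PySem.Set.mem_inter, List.mem_cons, and_assoc]

theorem pv_loop_eq_find (rest : List String) (first : List Char) (cs : List Char)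
    (hsub : ∀ c ∈ cs, c ∈ first) :
    pvALoop rest cs =
      (cs.find? (fun c => PySem.Set.contains (pvBCommon (PySem.Set.ofList first) rest) c)).map
        (fun c => String.ofList [c]) := by
  induction cs with
  | nil => rfl
  | cons c cs ih =>
    have hc : c ∈ first := hsub c (by simp)
    have hmem : PySem.Set.contains (pvBCommon (PySem.Set.ofList first) rest) c
        = pvAInner (String.ofList [c]) rest := by
      rw [pvAInner_eq_all]
      have hiff : (PySem.Set.contains (pvBCommon (PySem.Set.ofList first) rest) c = true)
          ↔ (∀ r ∈ rest, c ∈ r.toList) := by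
        rw [PySem.Set.contains_iff, pv_mem_common]
        simp [PySem.Set.mem_ofList, hc]
      by_cases hm : ∀ r ∈ rest, c ∈ r.toList
      · rw [hiff.mpr hm]
        symm
        simp only [List.all_eq_true]
        intro r hr
        rw [pv_isIn_singleton]
        simp [hm r hr]
      · have h0 : PySem.Set.contains (pvBCommon (PySem.Set.ofList first) rest) c = false := by
          rcases b : PySem.Set.contains (pvBCommon (PySem.Set.ofList first) rest) c
          · rfl
          · exact absurd (hiff.mp b) hm
        rw [h0]
        rw [not_forall] at hm
        simp only [_root_.not_imp] at hm
        obtain ⟨r, hr, hcr⟩ := hm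
        symm
        simp only [Bool.eq_false_iff, ne_eq, List.all_eq_true, not_forall]
        exact ⟨r, hr, by rw [pv_isIn_singleton]; simpa using hcr⟩
    simp only [pvALoop, List.find?_cons, ← hmem]
    rcases h : PySem.Set.contains (pvBCommon (PySem.Set.ofList first) rest) c
    · simp only [h, Bool.false_eq_true, if_false, cond_false]
      exact ih (fun x hx => hsub x (by simp [hx]))
    · simp [h]

-- ===== VERDICT (by name: the statement is the Claim_ definition above) =====
theorem get_shared_item_type_spec : Claim_equal_get_shared_item_type := by
  intro rucksacks _ hpre
  unfold Spec_get_shared_item_type get_shared_item_type get_shared_item_type_alt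
  rcases rucksacks with _ | ⟨first, rest⟩
  · exact absurd rfl hpre
  · have h0 : PySem.List.pyGet? (first :: rest) 0 = some first := by
      have := PySem.List.pyGet?_natCast (xs := first :: rest) (n := 0)
      simpa using this
    rw [h0]
    simp only
    rw [pv_loop_eq_find _ first.toList first.toList (fun _ h => h)]
    cases List.find? (fun c => PySem.Set.contains (pvBCommon (PySem.Set.ofList first.toList) (PySem.List.slice (first :: rest) (some 1) none)) c) first.toList <;> simp
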